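-- pv_equiv track=rewrite | github.com/RustemKhalilov/transaction_print_rev2 | func.py | filter_score
-- ===== SOURCE A (Python) =====
-- def filter_score(text_score: str):
--     """
--     Функция фильтрует приводит счет в надлежащий нам вид и скрывает цифры
--     """
--     score = []
--     for item in text_score:
--         if item.isdigit():
--             score.append(item)
--     score_out = []
--     for index, item in enumerate(score):
--         score_out.append(item)
--         if ((index + 1) % 4) == 0:
--             score_out.append(" ")
--     if len(score_out) == 20:
--         for index in range(10, 14):
--             score_out[index] = 'Х'
--     elif len(score_out) == 25:
--         for index in range(15, 19):
--             score_out[index] = 'Х'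
--     score_text = []
--     for item in text_score:
--         if item.isalpha() or item == " ":
--             score_text.append(item)
--     return "".join(score_text) + "".join(score_out)
-- ===== SOURCE B (Python) =====
-- def filter_score(text_score: str):
--     digits = [c for c in text_score if c.isdigit()]
--     n = len(digits)
--     if n == 16:
--         digits[8:12] = 'Х' * 4
--     elif n == 20:
--         digits[12:16] = 'Х' * 4
--     chunks = []
--     while digits:
--         chunks.append(''.join(digits[:4]))
--         digits = digits[4:]
--     grouped = ' '.join(chunks)
--     if n > 0 and n % 4 == 0:
--         grouped += ' '
--     prefix = ''.join(c for c in text_score if c.isalpha() or c == ' ')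
--     return prefix + grouped
-- ===== Notes on version B (the rewrite author's own statement) =====
-- stated objective: alternative
-- what changed: B masks the digit list first (digits[8:12] or digits[12:16] by digit count) and then groups it by chunking into slices of 4 joined with spaces, instead of A's interleaving spaces during an indexed loop and then overwriting positions of the space-interleaved buffer in place.
import Mathlib
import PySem

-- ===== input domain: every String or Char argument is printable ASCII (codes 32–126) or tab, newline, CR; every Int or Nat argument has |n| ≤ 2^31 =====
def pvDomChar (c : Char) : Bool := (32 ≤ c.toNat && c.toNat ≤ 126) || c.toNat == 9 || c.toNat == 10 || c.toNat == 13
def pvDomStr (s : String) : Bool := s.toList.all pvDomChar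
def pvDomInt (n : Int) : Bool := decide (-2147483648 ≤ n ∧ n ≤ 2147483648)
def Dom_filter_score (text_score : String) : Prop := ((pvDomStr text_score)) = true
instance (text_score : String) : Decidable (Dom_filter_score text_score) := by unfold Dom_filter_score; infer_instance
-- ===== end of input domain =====

-- B re-implements A by masking the digit list FIRST and then grouping it by chunks of 4 (alternative decomposition, same cost).

-- ===== PORT A =====
-- 'score_out.append(item); if ((index+1)%4)==0: score_out.append(" ")'
def pvAStep (acc : List Char) (p : Int × Char) : List Char :=
  let acc := acc ++ [p.2]
  if PySem.Int.mod (p.1 + 1) 4 == 0 then acc ++ [' '] else acc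

def filter_score (text_score : String) : String :=
  let score := text_score.toList.foldl
    (fun acc item => if PySem.Chars.isdigit item then acc ++ [item] else acc) []
  let score_out := (PySem.List.enumerate score 0).foldl pvAStep []
  let score_out :=
    if score_out.length = 20 then
      (PySem.List.pyRange 10 14 1).foldl (fun l i => PySem.List.pySetD l i 'Х') score_out
    else if score_out.length = 25 then
      (PySem.List.pyRange 15 19 1).foldl (fun l i => PySem.List.pySetD l i 'Х') score_out
    else score_out
  let score_text := text_score.toList.foldl
    (fun acc item => if PySem.Chars.isalpha item || item == ' ' then acc ++ [item] else acc) []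
  -- '"".join(score_text) + "".join(score_out)' (join of single-char strings, then str +)
  String.ofList (PySem.Chars.join [] (score_text.map (fun c => [c])) ++
             PySem.Chars.join [] (score_out.map (fun c => [c])))

-- ===== PORT B =====
-- the while loop 'while digits: chunks.append(''.join(digits[:4])); digits = digits[4:]'
def pvChunks : List Char → List (List Char)
  | [] => []
  | a :: b :: c :: d :: t => [a, b, c, d] :: pvChunks t
  | t => [t]

def filter_score_alt (text_score : String) : String :=
  let digits := text_score.toList.filter (fun c => PySem.Chars.isdigit c)
  let n := digits.length
  -- digits[8:12] = 'Х'*4  /  digits[12:16] = 'Х'*4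
  let digits :=
    if n = 16 then digits.take 8 ++ List.replicate 4 'Х' ++ digits.drop 12
    else if n = 20 then digits.take 12 ++ List.replicate 4 'Х' ++ digits.drop 16
    else digits
  let grouped := PySem.Chars.join [' '] (pvChunks digits)
  let grouped := if 0 < n ∧ n % 4 = 0 then grouped ++ [' '] else grouped
  let pre := text_score.toList.filter (fun c => PySem.Chars.isalpha c || c == ' ')
  String.ofList (pre ++ grouped)

-- ===== PRECONDITION & SPEC =====
def Spec_filter_score (text_score : String) (out : String) : Prop := out = filter_score_alt text_score
instance (text_score : String) (out : String) : Decidable (Spec_filter_score text_score out) := by unfold Spec_filter_score; infer_instance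

-- ===== CLAIM (what is proved, stated in full; the proofs are below) =====
def Claim_equal_filter_score : Prop := ∀ (text_score : String), Dom_filter_score text_score → Spec_filter_score text_score (filter_score text_score)

-- ===== LEMMAS AND PROOFS =====

-- A's enumerate loop as structural recursion on the digit list
def pvG (k : Int) : List Char → List Char
  | [] => []
  | c :: t => if PySem.Int.mod (k + 1) 4 == 0 then c :: ' ' :: pvG (k + 1) t
              else c :: pvG (k + 1) t

-- the common characterization: groups of 4 each followed by a space, an incomplete tail bare
def pvGB : List Char → List Char
  | a :: b :: c :: d :: t => a :: b :: c :: d :: ' ' :: pvGB t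
  | t => t

theorem pvG_eq_foldl (ds : List Char) : ∀ (k : Int) (acc : List Char),
    (PySem.List.enumerate ds k).foldl pvAStep acc = acc ++ pvG k ds := by
  induction ds with
  | nil => intro k acc; simp [PySem.List.enumerate_nil, pvG]
  | cons c t ih =>
    intro k acc
    rw [PySem.List.enumerate_cons]
    simp only [List.foldl_cons, ih, pvAStep, pvG]
    split <;> simp

theorem pvG_eq_GB : ∀ (n : Nat) (ds : List Char) (k : Int), ds.length = n → 0 ≤ k →
    PySem.Int.mod k 4 = 0 → pvG k ds = pvGB ds := by
  intro n
  induction n using Nat.strong_induction_on with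
  | _ n ih =>
    intro ds k hlen hk hmod
    rw [PySem.Int.mod_eq_emod_of_pos (by omega)] at hmod
    have d1 : ¬ (4 ∣ k + 1) := by omega
    have d2 : ¬ (4 ∣ k + 1 + 1) := by omega
    have d3 : ¬ (4 ∣ k + 1 + 1 + 1) := by omega
    have d4 : (4 ∣ k + 1 + 1 + 1 + 1) := by omega
    match ds with
    | [] => simp [pvG, pvGB]
    | [a] => simp [pvG, pvGB, d1]
    | [a, b] => simp [pvG, pvGB, d1, d2]
    | [a, b, c] => simp [pvG, pvGB, d1, d2, d3]
    | a :: b :: c :: d :: t =>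
      have ht : pvG (k + 1 + 1 + 1 + 1) t = pvGB t := by
        apply ih t.length (by simp at hlen; omega) t (k + 1 + 1 + 1 + 1) rfl (by omega)
        rw [PySem.Int.mod_eq_emod_of_pos (by omega)]; omega
      simp [pvG, pvGB, d1, d2, d3, d4, ht]

theorem pvChunks_eq_nil_iff (ds : List Char) : pvChunks ds = [] ↔ ds = [] := by
  match ds with
  | [] => simp [pvChunks]
  | [a] => simp [pvChunks]
  | [a, b] => simp [pvChunks]
  | [a, b, c] => simp [pvChunks]
  | a :: b :: c :: d :: t => simp [pvChunks]

theorem pvJoin_chunks_eq_GB : ∀ (n : Nat) (ds : List Char), ds.length = n →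
    PySem.Chars.join [' '] (pvChunks ds) ++
      (if 0 < ds.length ∧ ds.length % 4 = 0 then [' '] else []) = pvGB ds := by
  intro n
  induction n using Nat.strong_induction_on with
  | _ n ih =>
    intro ds hlen
    match ds with
    | [] => simp [pvChunks, pvGB, PySem.Chars.join_nil]
    | [a] => simp [pvChunks, pvGB, PySem.Chars.join_singleton]
    | [a, b] => simp [pvChunks, pvGB, PySem.Chars.join_singleton]
    | [a, b, c] => simp [pvChunks, pvGB, PySem.Chars.join_singleton]
    | [a, b, c, d] => simp [pvChunks, pvGB, PySem.Chars.join_singleton]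
    | a :: b :: c :: d :: t0 :: ts =>
      obtain ⟨x, xs, hx⟩ : ∃ x xs, pvChunks (t0 :: ts) = x :: xs := by
        rcases h : pvChunks (t0 :: ts) with _ | ⟨x, xs⟩
        · rw [pvChunks_eq_nil_iff] at h; simp at h
        · exact ⟨x, xs, rfl⟩
      have hlt : (t0 :: ts).length < n := by simp at hlen ⊢; omega
      have iht := ih _ hlt (t0 :: ts) rfl
      rw [hx] at iht
      simp only [pvChunks, pvGB, hx, PySem.Chars.join_cons_cons, List.length_cons] at iht ⊢
      by_cases hc : (ts.length + 1) % 4 = 0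
      · rw [if_pos (by omega)]
        rw [if_pos (by omega)] at iht
        simp only [List.append_assoc] at iht ⊢
        simp [iht]
      · rw [if_neg (by omega)]
        rw [if_neg (by omega)] at iht
        simp only [List.append_assoc] at iht ⊢
        simp [iht]

theorem pvGB_length : ∀ (n : Nat) (ds : List Char), ds.length = n →
    (pvGB ds).length = ds.length + ds.length / 4 := by
  intro n
  induction n using Nat.strong_induction_on with
  | _ n ih =>
    intro ds hlen
    match ds with
    | [] => simp [pvGB]
    | [a] => simp [pvGB]
    | [a, b] => simp [pvGB]
    | [a, b, c] => simp [pvGB]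
    | a :: b :: c :: d :: t =>
      have := ih t.length (by simp at hlen; omega) t rfl
      simp only [pvGB, List.length_cons, this]
      omega

theorem pvMask16 (ds : List Char) (h : ds.length = 16) :
    (PySem.List.pyRange 10 14 1).foldl (fun l i => PySem.List.pySetD l i 'Х') (pvGB ds)
      = pvGB (ds.take 8 ++ List.replicate 4 'Х' ++ ds.drop 12) := by
  rcases ds with _ | ⟨c0, ds⟩
  · simp at h
  rcases ds with _ | ⟨c1, ds⟩
  · simp at h
  rcases ds with _ | ⟨c2, ds⟩
  · simp at h
  rcases ds with _ | ⟨c3, ds⟩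
  · simp at h
  rcases ds with _ | ⟨c4, ds⟩
  · simp at h
  rcases ds with _ | ⟨c5, ds⟩
  · simp at h
  rcases ds with _ | ⟨c6, ds⟩
  · simp at h
  rcases ds with _ | ⟨c7, ds⟩
  · simp at h
  rcases ds with _ | ⟨c8, ds⟩
  · simp at h
  rcases ds with _ | ⟨c9, ds⟩
  · simp at h
  rcases ds with _ | ⟨c10, ds⟩
  · simp at h
  rcases ds with _ | ⟨c11, ds⟩
  · simp at h
  rcases ds with _ | ⟨c12, ds⟩
  · simp at h
  rcases ds with _ | ⟨c13, ds⟩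
  · simp at h
  rcases ds with _ | ⟨c14, ds⟩
  · simp at h
  rcases ds with _ | ⟨c15, ds⟩
  · simp at h
  rcases ds with _ | ⟨c16, ds⟩
  · rfl
  · simp at h

theorem pvMask20 (ds : List Char) (h : ds.length = 20) :
    (PySem.List.pyRange 15 19 1).foldl (fun l i => PySem.List.pySetD l i 'Х') (pvGB ds)
      = pvGB (ds.take 12 ++ List.replicate 4 'Х' ++ ds.drop 16) := by
  rcases ds with _ | ⟨c0, ds⟩
  · simp at h
  rcases ds with _ | ⟨c1, ds⟩
  · simp at h
  rcases ds with _ | ⟨c2, ds⟩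
  · simp at h
  rcases ds with _ | ⟨c3, ds⟩
  · simp at h
  rcases ds with _ | ⟨c4, ds⟩
  · simp at h
  rcases ds with _ | ⟨c5, ds⟩
  · simp at h
  rcases ds with _ | ⟨c6, ds⟩
  · simp at h
  rcases ds with _ | ⟨c7, ds⟩
  · simp at h
  rcases ds with _ | ⟨c8, ds⟩
  · simp at h
  rcases ds with _ | ⟨c9, ds⟩
  · simp at h
  rcases ds with _ | ⟨c10, ds⟩
  · simp at h
  rcases ds with _ | ⟨c11, ds⟩
  · simp at h
  rcases ds with _ | ⟨c12, ds⟩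
  · simp at h
  rcases ds with _ | ⟨c13, ds⟩
  · simp at h
  rcases ds with _ | ⟨c14, ds⟩
  · simp at h
  rcases ds with _ | ⟨c15, ds⟩
  · simp at h
  rcases ds with _ | ⟨c16, ds⟩
  · simp at h
  rcases ds with _ | ⟨c17, ds⟩
  · simp at h
  rcases ds with _ | ⟨c18, ds⟩
  · simp at h
  rcases ds with _ | ⟨c19, ds⟩
  · simp at h
  rcases ds with _ | ⟨c20, ds⟩
  · rfl
  · simp at h

-- ===== VERDICT (by name: the statement is the Claim_ definition above) =====
theorem filter_score_spec : Claim_equal_filter_score := by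
  intro s _
  unfold Spec_filter_score filter_score filter_score_alt
  simp only [PySem.List.foldl_append_if_eq_filter, List.nil_append,
    PySem.Chars.join_nil_singletons]
  rw [pvG_eq_foldl _ 0 []]
  simp only [List.nil_append]
  set ds := s.toList.filter (fun c => PySem.Chars.isdigit c) with hds
  rw [pvG_eq_GB ds.length ds 0 rfl (by omega) (by decide)]
  set n := ds.length with hn
  set ds' := (if n = 16 then ds.take 8 ++ List.replicate 4 'Х' ++ ds.drop 12
              else if n = 20 then ds.take 12 ++ List.replicate 4 'Х' ++ ds.drop 16
              else ds) with hds'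
  have hlen' : ds'.length = n := by
    rw [hds']; split_ifs with h1 h2
    · simp; omega
    · simp; omega
    · exact hn.symm
  have hB : (if 0 < n ∧ n % 4 = 0
        then PySem.Chars.join [' '] (pvChunks ds') ++ [' ']
        else PySem.Chars.join [' '] (pvChunks ds')) = pvGB ds' := by
    rw [← pvJoin_chunks_eq_GB ds'.length ds' rfl, hlen']
    split_ifs <;> simp
  rw [hB]
  have hGBlen := pvGB_length ds.length ds rfl
  rw [← hn] at hGBlen
  congr 1
  congr 1
  by_cases h16 : n = 16
  · rw [if_pos (by omega), pvMask16 ds h16, hds', if_pos h16]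
  · by_cases h20 : n = 20
    · rw [if_neg (by omega), if_pos (by omega), pvMask20 ds h20, hds', if_neg h16, if_pos h20]
    · rw [if_neg (by omega), if_neg (by omega), hds', if_neg h16, if_neg h20]
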